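-- pv_equiv track=rewrite | github.com/abstractionlair/cai-constitution-bootstrap | scripts/recompute_qc_repaired.py | is_runaway
-- ===== SOURCE A (Python) =====
-- def is_runaway(response: str) -> bool:
--     """
--     Detect runaway responses using pattern-based heuristic.
--
--     A response is a runaway if it contains prompt artifacts like:
--     - Starts generating new instructions
--     - Contains chat template markers
--     - Shows signs of continuing the prompt pattern
--
--     This is the CORRECTED heuristic (not the buggy len > 200 check).
--     """
--     runaway_patterns = [
--         '\n\nInstruction:',
--         '\n\nQuestion:',
--         '\n\nQ:',
--         '\nUser:',
--         '\nAssistant:',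
--         '\nHuman:',
--         '<|im_start|>',
--         '<|im_end|>'
--     ]
--
--     # Check for prompt continuation patterns
--     for pattern in runaway_patterns:
--         if pattern in response:
--             return True
--
--     # Also flag extremely long responses as potential runaways
--     # (but much more lenient than the old 200 char limit)
--     if len(response) > 500:
--         return True
--
--     return False
-- ===== SOURCE B (Python) =====
-- def is_runaway(response: str) -> bool:
--     """Single left-to-right scan: at each '\n' or '<' (the only characters any
--     runaway pattern can start with), test whether a pattern begins there;
--     otherwise fall back to the length heuristic."""
--     patterns = ('\n\nInstruction:', '\n\nQuestion:', '\n\nQ:',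
--                 '\nUser:', '\nAssistant:', '\nHuman:',
--                 '<|im_start|>', '<|im_end|>')
--     for i, c in enumerate(response):
--         if (c == '\n' or c == '<') and any(response.startswith(p, i) for p in patterns):
--             return True
--     return len(response) > 500
-- ===== Notes on version B (the rewrite author's own statement) =====
-- stated objective: alternative
-- what changed: Replaces eight independent substring scans ('pattern in response' per pattern) with one left-to-right pass over the string that, at each candidate start character ('\n' or '<'), tests the patterns by startswith at that position.
import Mathlib
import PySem

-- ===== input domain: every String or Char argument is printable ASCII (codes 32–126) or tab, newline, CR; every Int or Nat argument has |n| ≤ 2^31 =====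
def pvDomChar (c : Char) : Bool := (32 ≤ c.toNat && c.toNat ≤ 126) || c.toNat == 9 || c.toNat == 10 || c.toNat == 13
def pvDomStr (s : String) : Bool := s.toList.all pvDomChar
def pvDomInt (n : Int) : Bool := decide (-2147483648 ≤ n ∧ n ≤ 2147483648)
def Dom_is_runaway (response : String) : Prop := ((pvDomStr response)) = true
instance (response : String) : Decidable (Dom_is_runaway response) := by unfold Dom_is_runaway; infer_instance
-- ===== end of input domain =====

-- B changes the traversal: one scan over the string with per-position startswith tests
-- instead of A's per-pattern substring scans (objective: alternative, same result).

-- ===== PORT A =====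
def runawayPatterns : List String :=
  ["\n\nInstruction:", "\n\nQuestion:", "\n\nQ:",
   "\nUser:", "\nAssistant:", "\nHuman:",
   "<|im_start|>", "<|im_end|>"]

-- the 'for pattern in runaway_patterns' loop, returning True at the first hit
def runawayLoop : List String → String → Bool
  | [], _ => false
  | p :: ps, r => if PySem.Str.isIn p r then true else runawayLoop ps r

def is_runaway (response : String) : Bool :=
  if runawayLoop runawayPatterns response then true
  else if PySem.Str.len response > 500 then true
  else false

-- ===== PORT B =====
def altPatterns : List (List Char) :=
  ["\n\nInstruction:".toList, "\n\nQuestion:".toList, "\n\nQ:".toList,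
   "\nUser:".toList, "\nAssistant:".toList, "\nHuman:".toList,
   "<|im_start|>".toList, "<|im_end|>".toList]

-- Source B's enumerate loop: at each position, guard on the current char, then startswith there
def altScan : List Char → Bool
  | [] => false
  | c :: rest =>
      (((c == '\n') || (c == '<')) && altPatterns.any (fun p => p.isPrefixOf (c :: rest)))
      || altScan rest

def is_runaway_alt (response : String) : Bool :=
  altScan response.toList || decide (PySem.Str.len response > 500)

-- ===== PRECONDITION & SPEC =====
def Spec_is_runaway (response : String) (out : Bool) : Prop := out = is_runaway_alt response
instance (response : String) (out : Bool) : Decidable (Spec_is_runaway response out) := by unfold Spec_is_runaway; infer_instance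

-- ===== CLAIM (what is proved, stated in full; the proofs are below) =====
def Claim_equal_is_runaway : Prop := ∀ (response : String), Dom_is_runaway response → Spec_is_runaway response (is_runaway response)

-- ===== LEMMAS AND PROOFS =====

lemma runawayLoop_iff (ps : List String) (r : String) :
    runawayLoop ps r = true ↔ ∃ p ∈ ps, p.toList <:+: r.toList := by
  induction ps with
  | nil => simp [runawayLoop]
  | cons p ps ih =>
      simp only [runawayLoop, List.mem_cons]
      split
      next h =>
        simp only [true_iff]
        exact ⟨p, Or.inl rfl, (PySem.Str.isIn_iff_infix p r).mp h⟩
      next h =>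
        rw [ih]
        constructor
        · rintro ⟨q, hq, hi⟩; exact ⟨q, Or.inr hq, hi⟩
        · rintro ⟨q, rfl | hq, hi⟩
          · exact absurd ((PySem.Str.isIn_iff_infix q r).mpr hi) h
          · exact ⟨q, hq, hi⟩

-- every runaway pattern starts with '\n' or '<'
lemma altPatterns_head : ∀ p ∈ altPatterns, p.head? = some '\n' ∨ p.head? = some '<' := by
  decide

lemma altScan_iff (l : List Char) :
    altScan l = true ↔ ∃ p ∈ altPatterns, p <:+: l := by
  induction l with
  | nil =>
      simp only [altScan, Bool.false_eq_true, false_iff]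
      rintro ⟨p, hp, hi⟩
      have hnil : p = [] := List.eq_nil_of_infix_nil hi
      subst hnil
      rcases altPatterns_head [] hp with h1 | h1 <;> simp at h1
  | cons c rest ih =>
      simp only [altScan, Bool.or_eq_true, Bool.and_eq_true, List.any_eq_true, ih]
      constructor
      · rintro (⟨_, p, hp, hpre⟩ | ⟨p, hp, hi⟩)
        · exact ⟨p, hp, (List.isPrefixOf_iff_prefix.mp hpre).isInfix⟩
        · exact ⟨p, hp, List.infix_cons hi⟩
      · rintro ⟨p, hp, hi⟩
        rcases List.infix_cons_iff.mp hi with hpre | hrest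
        · refine Or.inl ⟨?_, p, hp, List.isPrefixOf_iff_prefix.mpr hpre⟩
          rcases hpre with ⟨u, hu⟩
          cases p with
          | nil => rcases altPatterns_head [] hp with h1 | h1 <;> simp at h1
          | cons a t =>
              simp only [List.cons_append, List.cons.injEq] at hu
              obtain ⟨rfl, -⟩ := hu
              rcases altPatterns_head (a :: t) hp with h1 | h1 <;> simp_all
        · exact Or.inr ⟨p, hp, hrest⟩

lemma altPatterns_eq : altPatterns = runawayPatterns.map String.toList := rfl

lemma loop_eq_scan (r : String) :
    runawayLoop runawayPatterns r = altScan r.toList := by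
  rw [Bool.eq_iff_iff, runawayLoop_iff, altScan_iff, altPatterns_eq]
  simp

-- ===== VERDICT (by name: the statement is the Claim_ definition above) =====
theorem is_runaway_spec : Claim_equal_is_runaway := by
  intro response _
  unfold Spec_is_runaway is_runaway is_runaway_alt
  rw [loop_eq_scan]
  by_cases h : altScan response.toList = true
  · simp [h]
  · simp [h]
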